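-- pv_equiv track=rewrite | github.com/liangyitt/Analysis-of-vaccination-status-in-the-United-States-12-months-after-the-start-of-covid19 | project-Vaccione.py | vaccine_by_state
-- ===== SOURCE A (Python) =====
-- def vaccine_by_state(states, vaccines):
--     ''' Function: vaccine_by_state
--         Parameters: list of state(strings),
--                     list of vaccines (ints), same length
--         Return: dictionary where key = state (string),
--                 value is a list of vaccine numbers (ints)
--                 ex: {"Connecticut" : [37400, 37400, 35800, ...]}
--     '''
--     state_dict = {}
--     for i in range(len(states)):
--         if states[i] in state_dict:
--             state_dict[states[i]].append(vaccines[i])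
--         else:
--             state_dict[states[i]] = [vaccines[i]]
--     return state_dict
-- ===== SOURCE B (Python) =====
-- def vaccine_by_state(states, vaccines):
--     """Group vaccine numbers by state: compute the distinct states in first-occurrence
--     order, then build each state's value list by one filtering comprehension over the
--     zipped pairs (no incremental dict mutation, no membership branch)."""
--     pairs = list(zip(states, vaccines))
--     return {s: [v for t, v in pairs if t == s] for s in dict.fromkeys(states)}
-- ===== Notes on version B (the rewrite author's own statement) =====
-- stated objective: alternative
-- what changed: Replaces A's single-pass incremental grouping (hash membership test, append-or-create per element) with a staged distinct-keys-then-filter scheme: dedup the states once, then for each distinct state build its whole value list by one filtering pass over the zipped pairs.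
import Mathlib
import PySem

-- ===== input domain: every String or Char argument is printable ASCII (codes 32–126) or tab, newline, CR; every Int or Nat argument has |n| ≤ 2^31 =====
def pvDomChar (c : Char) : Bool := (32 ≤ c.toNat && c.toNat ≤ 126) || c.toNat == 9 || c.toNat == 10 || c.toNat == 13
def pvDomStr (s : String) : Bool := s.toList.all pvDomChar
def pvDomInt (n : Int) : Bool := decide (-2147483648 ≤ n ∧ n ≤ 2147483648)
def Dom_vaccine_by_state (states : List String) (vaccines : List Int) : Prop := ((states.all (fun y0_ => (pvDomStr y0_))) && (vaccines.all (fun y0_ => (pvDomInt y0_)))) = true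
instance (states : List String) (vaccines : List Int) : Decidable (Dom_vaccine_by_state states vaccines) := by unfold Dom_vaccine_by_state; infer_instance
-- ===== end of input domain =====

-- B groups by a staged distinct-keys-then-filter scheme (dedup the states, then one
-- filtering pass per distinct state over the zipped pairs) instead of A's single-pass
-- incremental dict grouping; same values, no speed claim.
-- ===== PORT A =====
def vaccine_by_state (states : List String) (vaccines : List Int) : List (String × List Int) :=
  ((PySem.List.pyRange 0 states.length 1).foldl
    (fun d i =>
      let s := PySem.List.pyGetD states i ""
      let v := PySem.List.pyGetD vaccines i 0
      if d.contains s then d.modify s [] (fun l => l ++ [v]) else d.insert s [v])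
    PySem.Dict.empty).items

-- ===== PORT B =====
def vaccine_by_state_alt (states : List String) (vaccines : List Int) : List (String × List Int) :=
  let pairs := states.zip vaccines
  (PySem.List.dedup states).map
    (fun s => (s, (pairs.filter (fun p => p.1 == s)).map (fun p => p.2)))

-- ===== PRECONDITION & SPEC =====
-- Pre_: A indexes vaccines[i] for every i < len(states), so it raises IndexError iff vaccines is shorter.
def Pre_vaccine_by_state (states : List String) (vaccines : List Int) : Prop :=
  states.length ≤ vaccines.length
instance (states : List String) (vaccines : List Int) : Decidable (Pre_vaccine_by_state states vaccines) := by unfold Pre_vaccine_by_state; infer_instance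
def pvWitness_vaccine_by_state : List String × List Int := (["ct", "me", "ct"], [3, 5, 7])

def Spec_vaccine_by_state (states : List String) (vaccines : List Int) (out : List (String × List Int)) : Prop := out = vaccine_by_state_alt states vaccines
instance (states : List String) (vaccines : List Int) (out : List (String × List Int)) : Decidable (Spec_vaccine_by_state states vaccines out) := by unfold Spec_vaccine_by_state; infer_instance

-- ===== CLAIM (what is proved, stated in full; the proofs are below) =====
def Claim_equal_vaccine_by_state : Prop := ∀ (states : List String) (vaccines : List Int), Dom_vaccine_by_state states vaccines → Pre_vaccine_by_state states vaccines → Spec_vaccine_by_state states vaccines (vaccine_by_state states vaccines)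

-- ===== LEMMAS AND PROOFS =====

-- An index loop reading two parallel lists is a fold over their zip (when the second list is long enough).
lemma foldl_range_zip {α β γ : Type} (f : γ → α → β → γ) (da : α) (db : β) :
    ∀ (xs : List α) (ys : List β) (init : γ), xs.length ≤ ys.length →
    (List.range xs.length).foldl (fun acc k => f acc (xs.getD k da) (ys.getD k db)) init
      = (xs.zip ys).foldl (fun acc p => f acc p.1 p.2) init := by
  intro xs
  induction xs with
  | nil => intro ys init h; simp
  | cons x xs ih =>
    intro ys init h
    cases ys with
    | nil => simp at h
    | cons y ys =>
      simp only [List.length_cons, List.range_succ_eq_map, List.foldl_cons, List.foldl_map,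
        List.getD_cons_zero, List.getD_cons_succ, List.zip_cons_cons]
      exact ih ys (f init x y) (by simpa using h)

-- A's loop step is uniformly a modify-append (inserting [v] on a fresh key IS modify with default []).
lemma stepA_eq_modify (d : PySem.Dict String (List Int)) (s : String) (v : Int) :
    (if d.contains s then d.modify s [] (fun l => l ++ [v]) else d.insert s [v])
      = d.modify s [] (fun l => l ++ [v]) := by
  by_cases h : d.contains s = true
  · simp [h]
  · simp only [h, if_false, Bool.false_eq_true, PySem.Dict.modify,
      PySem.Dict.getD_of_not_contains d [] (by simpa using h)]
    simp

-- The canonical grouping A's loop computes: first-occurrence keys, each with its vaccines in order.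
lemma items_modify_loop (pairs : List (String × Int)) :
    (pairs.foldl (fun d p => d.modify p.1 [] (fun l => l ++ [p.2])) PySem.Dict.empty).items
      = (PySem.List.dedup (pairs.map (fun p => p.1))).map
          (fun k => (k, (pairs.filter (fun p => p.1 == k)).map (fun p => p.2))) := by
  have hnodup : ((pairs.foldl (fun d p => d.modify p.1 [] (fun l => l ++ [p.2])) PySem.Dict.empty).keys).Nodup :=
    PySem.Dict.nodup_keys_foldl_modify_key pairs (fun p => p.1) [] (fun d p l => l ++ [p.2])
      PySem.Dict.empty (by simp [PySem.Dict.keys_empty])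
  rw [PySem.Dict.items_eq_map_keys _ hnodup []]
  have hk : (pairs.foldl (fun d p => d.modify p.1 [] (fun l => l ++ [p.2])) PySem.Dict.empty).keys
      = PySem.List.dedup (pairs.map (fun p => p.1)) := by
    rw [PySem.Dict.keys_foldl_modify_key]
    simp [PySem.Dict.keys_empty, PySem.Set.update_nil_left, PySem.List.dedup_eq_ofList]
  rw [hk]
  apply List.map_congr_left
  intro k _
  simp [PySem.Dict.getD_foldl_modify_append, PySem.Dict.getD_empty]

-- Under Pre_, the first components of the zip are exactly the states.
lemma map_fst_zip_of_le {α β : Type} (xs : List α) (ys : List β) (h : xs.length ≤ ys.length) :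
    (xs.zip ys).map (fun p => p.1) = xs := by
  rw [List.map_fst_zip]
  exact h

theorem vaccine_by_state_spec : Claim_equal_vaccine_by_state := by
  intro states vaccines _ hpre
  unfold Spec_vaccine_by_state vaccine_by_state vaccine_by_state_alt
  rw [show ((states.length : Int)) = ((states.length : Nat) : Int) from rfl,
    PySem.List.pyRange_zero_nat states.length, List.foldl_map]
  simp only [PySem.List.pyGetD_natCast]
  rw [foldl_range_zip (fun d s v => if d.contains s then d.modify s [] (fun l => l ++ [v]) else d.insert s [v]) "" 0 states vaccines PySem.Dict.empty hpre]
  have hstep : (states.zip vaccines).foldl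
      (fun (d : PySem.Dict String (List Int)) p => if d.contains p.1 then d.modify p.1 [] (fun l => l ++ [p.2]) else d.insert p.1 [p.2]) PySem.Dict.empty
      = (states.zip vaccines).foldl (fun d p => d.modify p.1 [] (fun l => l ++ [p.2])) PySem.Dict.empty := by
    exact PySem.List.foldl_congr_mem _ _ _ _ (fun acc p _ => stepA_eq_modify acc p.1 p.2)
  rw [hstep, items_modify_loop, map_fst_zip_of_le states vaccines hpre]
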